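-- pv_equiv track=rewrite | github.com/Ashah17/pm_web | server/read_itinerary.py | breakdown_section
-- ===== SOURCE A (Python) =====
-- def breakdown_section(section):
--     places = []
--     restaurants = []
--     tips = []
--     transportation = []
--
--     lines = section.split("\n")
--     current_list = None
--
--     for line in lines:
--         line = line.strip()
--         if "Places" in line:
--             current_list = places
--         elif "Restaurant" in line:
--             current_list = restaurants
--         elif "Tips" in line:
--             current_list = tips
--         elif "Transporation" in line:
--             current_list = transportation
--         elif line.startswith("* ") or line.startswith("- "):
--             if current_list is not None:
--                 current_list.append(line[2:])
--         elif line and current_list is transportation: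
--             transportation.append(line)
--
--     return places, restaurants, tips, transportation
-- ===== SOURCE B (Python) =====
-- def breakdown_section(section):
--     HEADERS = [("Places", 0), ("Restaurant", 1), ("Tips", 2), ("Transporation", 3)]
--     # Pass 1: split the text into segments, each tagged with the category of the
--     # header that opened it (None before any header). Headers are recognised by
--     # the same substring tests, in the same precedence order, as the original.
--     segments = []
--     cur_cat, cur_lines = None, []
--     for raw in section.split("\n"):
--         line = raw.strip()
--         cat = next((c for key, c in HEADERS if key in line), None)
--         if cat is not None:
--             segments.append((cur_cat, cur_lines))
--             cur_cat, cur_lines = cat, []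
--         else:
--             cur_lines.append(line)
--     segments.append((cur_cat, cur_lines))
--     # Pass 2: collect each segment's lines into its category's bucket.
--     out = ([], [], [], [])
--     for cat, seg_lines in segments:
--         if cat is None:
--             continue
--         bucket = out[cat]
--         for line in seg_lines:
--             if line.startswith("* ") or line.startswith("- "):
--                 bucket.append(line[2:])
--             elif line and cat == 3:
--                 bucket.append(line)
--     return out
-- ===== Notes on version B (the rewrite author's own statement) =====
-- stated objective: alternative
-- what changed: B replaces A's single stateful dispatch loop (a mutable current-list pointer updated per line) by a two-phase decomposition: a first pass splits the text into header-tagged segments, a second pass folds each tagged segment's lines into its bucket.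
import Mathlib
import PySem

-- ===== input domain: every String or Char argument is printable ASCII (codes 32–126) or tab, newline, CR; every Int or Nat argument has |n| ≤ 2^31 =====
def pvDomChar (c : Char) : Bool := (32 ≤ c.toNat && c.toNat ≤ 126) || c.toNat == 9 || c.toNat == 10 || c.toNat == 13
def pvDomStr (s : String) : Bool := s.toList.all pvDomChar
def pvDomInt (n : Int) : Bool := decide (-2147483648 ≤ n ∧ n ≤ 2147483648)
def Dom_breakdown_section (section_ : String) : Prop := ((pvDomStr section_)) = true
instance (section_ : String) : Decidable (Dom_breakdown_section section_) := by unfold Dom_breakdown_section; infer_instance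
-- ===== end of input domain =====

-- B restructures A's single stateful dispatch loop into two phases: segment the lines
-- by header, then collect each tagged segment into its bucket. Same return value; A is total.

-- ===== PORT A =====
-- state: (places, restaurants, tips, transportation, current_list as an Option tag)
def pvAStep (st : (List String × List String × List String × List String) × Option Nat)
    (raw : String) : (List String × List String × List String × List String) × Option Nat :=
  let line := PySem.Str.strip raw
  let (out, cur) := st
  let (p, r, t, tr) := out
  if PySem.Str.isIn "Places" line then (out, some 0)
  else if PySem.Str.isIn "Restaurant" line then (out, some 1)
  else if PySem.Str.isIn "Tips" line then (out, some 2)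
  else if PySem.Str.isIn "Transporation" line then (out, some 3)
  else if PySem.Str.startswith line "* " || PySem.Str.startswith line "- " then
    match cur with
    | some 0 => ((p ++ [PySem.Str.slice line (some 2) none], r, t, tr), cur)
    | some 1 => ((p, r ++ [PySem.Str.slice line (some 2) none], t, tr), cur)
    | some 2 => ((p, r, t ++ [PySem.Str.slice line (some 2) none], tr), cur)
    | some 3 => ((p, r, t, tr ++ [PySem.Str.slice line (some 2) none]), cur)
    | _ => st
  else if line ≠ "" ∧ cur = some 3 then ((p, r, t, tr ++ [line]), cur)
  else st

def breakdown_section (section_ : String) : List String × List String × List String × List String :=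
  let lines := (PySem.Str.split? section_ "\n").getD []
  (lines.foldl pvAStep (([], [], [], []), none)).1

-- ===== PORT B =====
def pvHeaderCat (line : String) : Option Nat :=
  if PySem.Str.isIn "Places" line then some 0
  else if PySem.Str.isIn "Restaurant" line then some 1
  else if PySem.Str.isIn "Tips" line then some 2
  else if PySem.Str.isIn "Transporation" line then some 3
  else none

-- pass 1 step: a header line closes the current segment and opens a new tagged one
def pvBSeg (st : List (Option Nat × List String) × (Option Nat × List String)) (raw : String) :
    List (Option Nat × List String) × (Option Nat × List String) :=
  let line := PySem.Str.strip raw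
  match pvHeaderCat line with
  | some c => (st.1 ++ [st.2], (some c, []))
  | none => (st.1, (st.2.1, st.2.2 ++ [line]))

def pvBPush (c : Nat) (out : List String × List String × List String × List String)
    (x : String) : List String × List String × List String × List String :=
  match c, out with
  | 0, (p, r, t, tr) => (p ++ [x], r, t, tr)
  | 1, (p, r, t, tr) => (p, r ++ [x], t, tr)
  | 2, (p, r, t, tr) => (p, r, t ++ [x], tr)
  | 3, (p, r, t, tr) => (p, r, t, tr ++ [x])
  | _, out => out

def pvBLine (c : Nat) (out : List String × List String × List String × List String)
    (line : String) : List String × List String × List String × List String :=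
  if PySem.Str.startswith line "* " || PySem.Str.startswith line "- " then
    pvBPush c out (PySem.Str.slice line (some 2) none)
  else if line ≠ "" ∧ c = 3 then pvBPush c out line
  else out

-- pass 2 step: collect one tagged segment into its bucket (untagged segments are skipped)
def pvBSegOut (out : List String × List String × List String × List String)
    (seg : Option Nat × List String) : List String × List String × List String × List String :=
  match seg.1 with
  | none => out
  | some c => seg.2.foldl (pvBLine c) out

def breakdown_section_alt (section_ : String) : List String × List String × List String × List String :=
  let lines := (PySem.Str.split? section_ "\n").getD []
  let (segs, cur) := lines.foldl pvBSeg ([], (none, []))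
  (segs ++ [cur]).foldl pvBSegOut ([], [], [], [])

-- ===== PRECONDITION & SPEC =====
def Spec_breakdown_section (section_ : String) (out : List String × List String × List String × List String) : Prop := out = breakdown_section_alt section_
instance (section_ : String) (out : List String × List String × List String × List String) : Decidable (Spec_breakdown_section section_ out) := by unfold Spec_breakdown_section; infer_instance

-- ===== CLAIM (what is proved, stated in full; the proofs are below) =====
def Claim_equal_breakdown_section : Prop := ∀ (section_ : String), Dom_breakdown_section section_ → Spec_breakdown_section section_ (breakdown_section section_)

-- ===== LEMMAS AND PROOFS =====

-- A's step, characterized through B's helpers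
lemma pvAStep_char (st : (List String × List String × List String × List String) × Option Nat)
    (raw : String) :
    pvAStep st raw =
      match pvHeaderCat (PySem.Str.strip raw) with
      | some c => (st.1, some c)
      | none =>
        match st.2 with
        | none => st
        | some c => (pvBLine c st.1 (PySem.Str.strip raw), st.2) := by
  obtain ⟨⟨p, r, t, tr⟩, cur⟩ := st
  unfold pvAStep pvHeaderCat pvBLine pvBPush
  split_ifs with h1 h2 h3 h4 h5 h6 <;> simp_all <;>
    rcases cur with _ | (_ | _ | _ | _ | c) <;> (simp_all; try (split <;> simp_all))

-- the final result of B's two passes, from an arbitrary pass-1 state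
def pvFinish (st : List (Option Nat × List String) × (Option Nat × List String)) :
    (List String × List String × List String × List String) × Option Nat :=
  ((st.1 ++ [st.2]).foldl pvBSegOut ([], [], [], []), st.2.1)

lemma pvMain : ∀ (lines : List String)
    (st : List (Option Nat × List String) × (Option Nat × List String)),
    pvFinish (lines.foldl pvBSeg st) = lines.foldl pvAStep (pvFinish st) := by
  intro lines
  induction lines with
  | nil => intro st; rfl
  | cons raw rest ih =>
    intro st
    obtain ⟨segs, c?, ls⟩ := st
    simp only [List.foldl_cons, pvAStep_char]
    rcases hc : pvHeaderCat (PySem.Str.strip raw) with _ | c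
    · -- no header: the stripped line joins the current segment
      rw [show pvBSeg (segs, (c?, ls)) raw = (segs, (c?, ls ++ [PySem.Str.strip raw])) by
        simp [pvBSeg, hc]]
      rw [ih]
      cases c? <;> simp [pvFinish, pvBSegOut]
    · -- header: close the current segment, open an empty one tagged c
      rw [show pvBSeg (segs, (c?, ls)) raw = (segs ++ [(c?, ls)], (some c, [])) by
        simp [pvBSeg, hc]]
      rw [ih]
      simp [pvFinish, pvBSegOut]

-- ===== VERDICT (by name: the statement is the Claim_ definition above) =====
theorem breakdown_section_spec : Claim_equal_breakdown_section := by
  intro section_ _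
  show breakdown_section section_ = breakdown_section_alt section_
  unfold breakdown_section breakdown_section_alt
  have h := pvMain ((PySem.Str.split? section_ "\n").getD []) ([], (none, []))
  simp only [pvFinish, List.nil_append, List.foldl_cons, List.foldl_nil, pvBSegOut] at h
  rcases hst : List.foldl pvBSeg ([], (none, []))
      ((PySem.Str.split? section_ "\n").getD []) with ⟨segs, cur⟩
  rw [hst] at h
  simp only [hst]
  exact (congrArg Prod.fst h).symm
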